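-- pv_equiv track=rewrite | github.com/nsnro/persRepo | Python/Course/PythonFunctions/Practice1.py | problemTen
-- ===== SOURCE A (Python) =====
-- def problemTen(inputArray):
--     ignore = False
--     sum = 0
--     for i in range(0, len(inputArray)):
--         if ignore:
--             if inputArray[i] == 9:
--                 ignore = False
--                 continue
--             else:
--                 continue
--         if not ignore:
--             if inputArray[i] == 6:
--                 ignore = True
--             else:
--                 sum = sum + inputArray[i]
--
--     return sum
-- ===== SOURCE B (Python) =====
-- def problemTen(inputArray):
--     it = iter(inputArray)
--     total = 0
--     for x in it:
--         if x == 6: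
--             for y in it:
--                 if y == 9:
--                     break
--         else:
--             total += x
--     return total
-- ===== Notes on version B (the rewrite author's own statement) =====
-- stated objective: idiomatic
-- what changed: Replaces the boolean ignore-flag state machine over indices with a shared iterator: a nested inner loop consumes the elements of a 6..9 span directly, so no flag state is threaded through the pass.
import Mathlib
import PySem

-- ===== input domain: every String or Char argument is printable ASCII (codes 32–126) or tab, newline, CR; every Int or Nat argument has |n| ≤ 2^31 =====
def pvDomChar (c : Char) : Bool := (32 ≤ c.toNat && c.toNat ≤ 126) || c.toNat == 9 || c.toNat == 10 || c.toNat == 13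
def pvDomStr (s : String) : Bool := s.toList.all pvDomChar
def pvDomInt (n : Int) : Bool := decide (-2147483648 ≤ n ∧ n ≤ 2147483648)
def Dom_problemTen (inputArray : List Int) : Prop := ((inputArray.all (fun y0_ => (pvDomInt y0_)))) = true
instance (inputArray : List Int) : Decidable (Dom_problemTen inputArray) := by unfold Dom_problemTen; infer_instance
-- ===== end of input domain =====

-- B replaces A's boolean ignore-flag state machine by a nested loop that consumes a
-- 6..9 span directly (objective: idiomatic); same O(n) cost, return value proved equal.

-- ===== PORT A =====
-- A folds over the elements carrying the state (ignore, sum); iterating over the list's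
-- elements is exact for Python's `for i in range(0, len(a)): … a[i] …` (indices always in range).
def problemTen (inputArray : List Int) : Int :=
  (inputArray.foldl
    (fun (st : Bool × Int) x =>
      if st.1 then
        if x == 9 then (false, st.2) else (true, st.2)
      else
        if x == 6 then (true, st.2) else (false, st.2 + x))
    (false, 0)).2

-- ===== PORT B =====
-- inner `for y in it: if y == 9: break` — returns the iterator's remaining elements
def pvSkip9 : List Int → List Int
  | [] => []
  | y :: ys => if y == 9 then ys else pvSkip9 ys

theorem pvSkip9_length_le (l : List Int) : (pvSkip9 l).length ≤ l.length := by
  induction l with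
  | nil => simp [pvSkip9]
  | cons y ys ih => simp only [pvSkip9]; split <;> simp; omega

-- outer `for x in it`, sharing the iterator with the inner loop
def pvOuter : List Int → Int
  | [] => 0
  | x :: xs =>
      if x == 6 then pvOuter (pvSkip9 xs)
      else x + pvOuter xs
  termination_by l => l.length
  decreasing_by
    · have := pvSkip9_length_le xs; simp; omega
    · simp

def problemTen_alt (inputArray : List Int) : Int := pvOuter inputArray

-- ===== PRECONDITION & SPEC =====
def Spec_problemTen (inputArray : List Int) (out : Int) : Prop := out = problemTen_alt inputArray
instance (inputArray : List Int) (out : Int) : Decidable (Spec_problemTen inputArray out) := by unfold Spec_problemTen; infer_instance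

-- ===== CLAIM (what is proved, stated in full; the proofs are below) =====
def Claim_equal_problemTen : Prop := ∀ (inputArray : List Int), Dom_problemTen inputArray → Spec_problemTen inputArray (problemTen inputArray)

-- ===== LEMMAS AND PROOFS =====

-- A's loop body, named for the proofs
def pvStepA (st : Bool × Int) (x : Int) : Bool × Int :=
  if st.1 then
    if x == 9 then (false, st.2) else (true, st.2)
  else
    if x == 6 then (true, st.2) else (false, st.2 + x)

theorem problemTen_eq_foldl (l : List Int) :
    problemTen l = (l.foldl pvStepA (false, 0)).2 := rfl

-- Mutual invariant, by strong induction on the length: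
-- from ignore=false the tail contributes pvOuter; from ignore=true it contributes pvOuter of the skipped suffix.
theorem pvLoop_inv : ∀ (n : ℕ) (l : List Int), l.length ≤ n →
    (∀ s : Int, (l.foldl pvStepA (false, s)).2 = s + pvOuter l) ∧
    (∀ s : Int, (l.foldl pvStepA (true, s)).2 = s + pvOuter (pvSkip9 l)) := by
  intro n
  induction n with
  | zero =>
    intro l hl
    have : l = [] := List.eq_nil_of_length_eq_zero (Nat.le_zero.mp hl)
    subst this
    constructor <;> intro s <;> simp [pvOuter, pvSkip9]
  | succ n ih =>
    intro l hl
    match l with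
    | [] => constructor <;> intro s <;> simp [pvOuter, pvSkip9]
    | x :: xs =>
      have hxs : xs.length ≤ n := by simpa using Nat.succ_le_succ_iff.mp hl
      constructor
      · intro s
        by_cases h6 : x = 6
        · subst h6
          have := (ih xs hxs).2 s
          simp [List.foldl_cons, pvStepA, pvOuter, this]
        · have := (ih xs hxs).1 (s + x)
          simp [List.foldl_cons, pvStepA, h6, pvOuter, this]
          ring
      · intro s
        by_cases h9 : x = 9
        · subst h9
          have := (ih xs hxs).1 s
          simp [List.foldl_cons, pvStepA, pvSkip9, this]
        · have hs : (pvSkip9 xs).length ≤ n :=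
            le_trans (pvSkip9_length_le xs) hxs
          have := (ih (pvSkip9 xs) hs).2 s
          -- from ignore=true, a non-9 element is discarded
          simp [List.foldl_cons, pvStepA, h9, pvSkip9]
          have h2 := (ih xs hxs).2 s
          simpa using h2

-- ===== VERDICT (by name: the statement is the Claim_ definition above) =====
theorem problemTen_spec : Claim_equal_problemTen := by
  unfold Claim_equal_problemTen
  intro l _
  unfold Spec_problemTen problemTen_alt
  rw [problemTen_eq_foldl]
  have := (pvLoop_inv l.length l le_rfl).1 0
  simpa using this
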